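-- pv_equiv track=rewrite | github.com/whyman903/compile-obsidian | compile/obsidian.py | _inferred_page_type
-- ===== SOURCE A (Python) =====
-- def _inferred_page_type(relative_path: str) -> str:
--     normalized = relative_path.replace("\\", "/")
--     folder_map = {
--         "wiki/articles/": "article",
--         "wiki/sources/": "source",
--         "wiki/maps/": "map",
--         "wiki/outputs/": "output",
--         "wiki/concepts/": "concept",
--         "wiki/entities/": "entity",
--         "wiki/questions/": "question",
--         "wiki/dashboards/": "dashboard",
--         "pages/": "article",
--     }
--     for prefix, page_type in folder_map.items():
--         if normalized.startswith(prefix):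
--             return page_type
--     return "unknown"
-- ===== SOURCE B (Python) =====
-- def _inferred_page_type(relative_path: str) -> str:
--     parts = relative_path.replace("\\", "/").split("/")
--     if parts[0] == "pages" and len(parts) >= 2:
--         return "article"
--     if parts[0] == "wiki" and len(parts) >= 3:
--         return {
--             "articles": "article",
--             "sources": "source",
--             "maps": "map",
--             "outputs": "output",
--             "concepts": "concept",
--             "entities": "entity",
--             "questions": "question",
--             "dashboards": "dashboard",
--         }.get(parts[1], "unknown")
--     return "unknown"
-- ===== Notes on version B (the rewrite author's own statement) =====
-- stated objective: idiomatic
-- what changed: B splits the normalized path into '/'-separated segments once and branches on the first segment with a small type dict indexed by the second segment, instead of A's ordered scan over nine string prefixes.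
import Mathlib
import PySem

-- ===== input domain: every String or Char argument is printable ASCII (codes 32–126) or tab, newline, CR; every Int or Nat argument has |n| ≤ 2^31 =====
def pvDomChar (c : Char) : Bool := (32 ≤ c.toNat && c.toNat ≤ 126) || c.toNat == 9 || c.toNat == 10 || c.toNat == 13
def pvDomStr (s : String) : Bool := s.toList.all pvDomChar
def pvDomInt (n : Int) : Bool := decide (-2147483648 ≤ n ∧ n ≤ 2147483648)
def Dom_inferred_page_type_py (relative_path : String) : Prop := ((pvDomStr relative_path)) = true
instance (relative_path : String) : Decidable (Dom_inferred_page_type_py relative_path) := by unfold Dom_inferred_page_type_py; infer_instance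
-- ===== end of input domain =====

-- B replaces A's ordered scan over nine path prefixes by one split on '/' and a branch on the
-- first segment with a dict keyed by the second segment (idiomatic restructuring, same results).

-- ===== PORT A =====
-- the 'for prefix, page_type in folder_map.items(): if normalized.startswith(prefix): return page_type' loop
def pvAScan : List (String × String) → String → String
  | [], _ => "unknown"
  | (pfx, pageType) :: rest, normalized =>
    if PySem.Str.startswith normalized pfx then pageType else pvAScan rest normalized

def inferred_page_type_py (relative_path : String) : String :=
  let normalized := PySem.Str.replace relative_path "\\" "/"
  let folder_map : PySem.Dict String String := PySem.Dict.ofList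
    [("wiki/articles/", "article"), ("wiki/sources/", "source"), ("wiki/maps/", "map"),
     ("wiki/outputs/", "output"), ("wiki/concepts/", "concept"), ("wiki/entities/", "entity"),
     ("wiki/questions/", "question"), ("wiki/dashboards/", "dashboard"), ("pages/", "article")]
  pvAScan folder_map.items normalized

-- ===== PORT B =====
def pvTypeMap : PySem.Dict String String := PySem.Dict.ofList
  [("articles", "article"), ("sources", "source"), ("maps", "map"), ("outputs", "output"),
   ("concepts", "concept"), ("entities", "entity"), ("questions", "question"), ("dashboards", "dashboard")]

def inferred_page_type_py_alt (relative_path : String) : String :=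
  let parts := PySem.Chars.splitOn (PySem.Str.replace relative_path "\\" "/").toList ['/']
  match parts with
  | [] => "unknown"   -- unreachable: str.split("/") never returns an empty list
  | p0 :: rest =>
    if p0 = "pages".toList ∧ 1 ≤ rest.length then "article"
    else if p0 = "wiki".toList ∧ 2 ≤ rest.length then
      match rest with
      | p1 :: _ => pvTypeMap.getD (String.ofList p1) "unknown"
      | [] => "unknown"   -- unreachable given 2 ≤ rest.length
    else "unknown"

-- ===== PRECONDITION & SPEC =====
def Spec_inferred_page_type_py (relative_path : String) (out : String) : Prop := out = inferred_page_type_py_alt relative_path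
instance (relative_path : String) (out : String) : Decidable (Spec_inferred_page_type_py relative_path out) := by unfold Spec_inferred_page_type_py; infer_instance

-- ===== CLAIM (what is proved, stated in full; the proofs are below) =====
def Claim_equal_inferred_page_type_py : Prop := ∀ (relative_path : String), Dom_inferred_page_type_py relative_path → Spec_inferred_page_type_py relative_path (inferred_page_type_py relative_path)

-- ===== LEMMAS AND PROOFS =====

-- proof-side recursive characterisation of split-on-'/'
def pvSegs : List Char → List (List Char)
  | [] => [[]]
  | c :: rest =>
    if c = '/' then [] :: pvSegs rest
    else match pvSegs rest with
      | s :: ss => (c :: s) :: ss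
      | [] => [[c]]

theorem pvSegs_ne_nil (l : List Char) : pvSegs l ≠ [] := by
  cases l with
  | nil => simp [pvSegs]
  | cons c rest =>
    simp only [pvSegs]
    split
    · simp
    · split <;> simp

theorem pvGo_eq (l : List Char) : ∀ (fuel : Nat) (cur : List Char) (acc : List (List Char)),
    l.length < fuel →
    PySem.Chars.splitOn.go ['/'] fuel l cur acc =
      acc.reverse ++ (match pvSegs l with
        | s :: ss => (cur.reverse ++ s) :: ss
        | [] => [cur.reverse]) := by
  induction l with
  | nil =>
    intro fuel cur acc h
    match fuel with
    | fuel + 1 => simp [PySem.Chars.splitOn.go, pvSegs]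
  | cons c rest ih =>
    intro fuel cur acc h
    match fuel with
    | fuel + 1 =>
      by_cases hc : c = '/'
      · subst hc
        rw [show PySem.Chars.splitOn.go ['/'] (fuel+1) ('/'::rest) cur acc
              = PySem.Chars.splitOn.go ['/'] fuel rest [] (cur.reverse :: acc) from by
            simp [PySem.Chars.splitOn.go, List.isPrefixOf]]
        rw [ih fuel [] (cur.reverse :: acc) (by simpa using Nat.lt_of_succ_lt_succ h)]
        rcases hrest : pvSegs rest with _ | ⟨s, ss⟩
        · exact absurd hrest (pvSegs_ne_nil rest)
        · simp [pvSegs, hrest]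
      · rw [show PySem.Chars.splitOn.go ['/'] (fuel+1) (c::rest) cur acc
              = PySem.Chars.splitOn.go ['/'] fuel rest (c::cur) acc from by
            simp only [PySem.Chars.splitOn.go, List.isPrefixOf, Bool.and_eq_true, beq_iff_eq]
            split
            · rename_i hx; exact absurd hx.1.symm hc
            · rfl]
        rw [ih fuel (c::cur) acc (by simpa using Nat.lt_of_succ_lt_succ h)]
        rcases hrest : pvSegs rest with _ | ⟨s, ss⟩
        · exact absurd hrest (pvSegs_ne_nil rest)
        · simp [pvSegs, hc, hrest]

theorem pvSplitOn_eq_segs (l : List Char) : PySem.Chars.splitOn l ['/'] = pvSegs l := by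
  have h := pvGo_eq l (l.length + 1) [] [] (Nat.lt_succ_self _)
  rcases hl : pvSegs l with _ | ⟨s, ss⟩
  · exact absurd hl (pvSegs_ne_nil l)
  · rw [hl] at h; simpa [PySem.Chars.splitOn] using h

theorem pvSegs_append (a t : List Char) (ha : '/' ∉ a) :
    pvSegs (a ++ '/' :: t) = a :: pvSegs t := by
  induction a with
  | nil => simp [pvSegs]
  | cons c rest ih =>
    have hc : c ≠ '/' := fun h => ha (h ▸ List.mem_cons_self)
    have hr : '/' ∉ rest := fun h => ha (List.mem_cons_of_mem _ h)
    simp [pvSegs, hc, ih hr]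

theorem pvSegs_spec (n : List Char) : ∀ s ss, pvSegs n = s :: ss →
    '/' ∉ s ∧ ((ss = [] ∧ n = s) ∨ ∃ t, n = s ++ '/' :: t ∧ pvSegs t = ss) := by
  induction n with
  | nil =>
    intro s ss h
    rw [show pvSegs [] = [[]] from rfl] at h
    injection h with h1 h2
    subst h2
    simp [← h1]
  | cons c rest ih =>
    intro s ss h
    by_cases hc : c = '/'
    · subst hc
      rw [show pvSegs ('/'::rest) = [] :: pvSegs rest from by simp [pvSegs]] at h
      injection h with h1 h2
      refine ⟨by simp [← h1], Or.inr ⟨rest, by simp [← h1], h2⟩⟩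
    · rcases hrest : pvSegs rest with _ | ⟨s', ss'⟩
      · exact absurd hrest (pvSegs_ne_nil rest)
      · simp only [pvSegs, if_neg hc, hrest] at h
        obtain ⟨hs, hss⟩ := List.cons.inj h
        obtain ⟨hns, hcase⟩ := ih s' ss' hrest
        subst hs; subst hss
        refine ⟨by
          intro hmem
          rcases List.mem_cons.mp hmem with hx | hx
          · exact hc hx.symm
          · exact hns hx, ?_⟩
        rcases hcase with ⟨h1, h2⟩ | ⟨t, h1, h2⟩
        · exact Or.inl ⟨h1, by rw [h2]⟩
        · exact Or.inr ⟨t, by rw [h1]; rfl, h2⟩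

-- startswith facts
theorem pvSW_true_append (p t : List Char) : PySem.Chars.startswith (p ++ t) p = true := by
  rw [PySem.Chars.startswith_iff]; exact List.prefix_append p t

theorem pvSW_false_noslash (n a b : List Char) (hn : '/' ∉ n) :
    PySem.Chars.startswith n (a ++ '/' :: b) = false := by
  by_contra h
  rw [Bool.not_eq_false] at h
  have h' : (a ++ '/' :: b) <+: n := (PySem.Chars.startswith_iff _ _).mp h
  exact hn (h'.sublist.subset (by simp))

theorem pvSW_false_of_seg (n a b s : List Char) (ss : List (List Char)) (ha : '/' ∉ a)
    (hs : pvSegs n = s :: ss) (hne : s ≠ a) :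
    PySem.Chars.startswith n (a ++ '/' :: b) = false := by
  by_contra h
  rw [Bool.not_eq_false] at h
  have h' : (a ++ '/' :: b) <+: n := (PySem.Chars.startswith_iff _ _).mp h
  have h2 : (a ++ ['/']) <+: n := List.IsPrefix.trans ⟨b, by simp⟩ h'
  obtain ⟨u, hu⟩ := h2
  have hn : n = a ++ '/' :: u := by rw [← hu]; simp
  rw [hn, pvSegs_append a u ha] at hs
  exact hne (List.cons.inj hs).1.symm

theorem pvWikiKey (k t : List Char) :
    PySem.Chars.startswith ("wiki".toList ++ '/' :: t) ("wiki".toList ++ '/' :: (k ++ ['/'])) = true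
      ↔ ∃ u, t = k ++ '/' :: u := by
  rw [PySem.Chars.startswith_iff]
  rw [List.prefix_append_right_inj, List.cons_prefix_cons]
  constructor
  · rintro ⟨-, u, hu⟩
    exact ⟨u, by rw [← hu]; simp⟩
  · rintro ⟨u, hu⟩
    exact ⟨rfl, u, by rw [hu]; simp⟩

theorem pvOfList_eq_iff (l : List Char) (s : String) : String.ofList l = s ↔ l = s.toList := by
  constructor
  · intro h; simpa using congrArg String.toList h
  · intro h; subst h; simp

theorem pvLookup_unknown (x : String) (h1 : x ≠ "articles") (h2 : x ≠ "sources") (h3 : x ≠ "maps")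
    (h4 : x ≠ "outputs") (h5 : x ≠ "concepts") (h6 : x ≠ "entities") (h7 : x ≠ "questions")
    (h8 : x ≠ "dashboards") : pvTypeMap.getD x "unknown" = "unknown" := by
  rw [show pvTypeMap = PySem.Dict.mk [("articles", "article"), ("sources", "source"), ("maps", "map"),
    ("outputs", "output"), ("concepts", "concept"), ("entities", "entity"), ("questions", "question"),
    ("dashboards", "dashboard")] from by decide]
  simp [PySem.Dict.getD, beq_iff_eq, PySem.Dict.get?,
    Ne.symm h1, Ne.symm h2, Ne.symm h3, Ne.symm h4, Ne.symm h5, Ne.symm h6, Ne.symm h7, Ne.symm h8]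

theorem pvMain (m : String) :
    pvAScan [("wiki/articles/", "article"), ("wiki/sources/", "source"), ("wiki/maps/", "map"),
      ("wiki/outputs/", "output"), ("wiki/concepts/", "concept"), ("wiki/entities/", "entity"),
      ("wiki/questions/", "question"), ("wiki/dashboards/", "dashboard"), ("pages/", "article")] m
    = (match PySem.Chars.splitOn m.toList ['/'] with
      | [] => "unknown"
      | p0 :: rest =>
        if p0 = "pages".toList ∧ 1 ≤ rest.length then "article"
        else if p0 = "wiki".toList ∧ 2 ≤ rest.length then
          match rest with
          | p1 :: _ => pvTypeMap.getD (String.ofList p1) "unknown"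
          | [] => "unknown"
        else "unknown") := by
  have hstr0 : ∀ p : String, PySem.Str.startswith m p = PySem.Chars.startswith m.toList p.toList := by
    intro p; rw [PySem.Str.startswith_eq]
  simp only [pvAScan, hstr0]
  generalize m.toList = n
  rcases hsegs : pvSegs n with _ | ⟨s, ss⟩
  · exact absurd hsegs (pvSegs_ne_nil n)
  obtain ⟨hslash, hcase⟩ := pvSegs_spec n s ss hsegs
  rw [pvSplitOn_eq_segs, hsegs]
  rcases hcase with ⟨hss, hns⟩ | ⟨t, hnt, hsegt⟩
  · -- no '/' in n at all: everything is "unknown"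
    subst hss
    have hFw : ∀ (a b : List Char), PySem.Chars.startswith n (a ++ '/' :: b) = false :=
      fun a b => pvSW_false_noslash n a b (by rw [hns]; exact hslash)
    have h1 : PySem.Chars.startswith n "wiki/articles/".toList = false := by
      rw [show ("wiki/articles/" : String).toList = "wiki".toList ++ '/' :: ("articles".toList ++ ['/']) from by decide]
      exact hFw _ _
    have h2 : PySem.Chars.startswith n "wiki/sources/".toList = false := by
      rw [show ("wiki/sources/" : String).toList = "wiki".toList ++ '/' :: ("sources".toList ++ ['/']) from by decide]
      exact hFw _ _
    have h3 : PySem.Chars.startswith n "wiki/maps/".toList = false := by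
      rw [show ("wiki/maps/" : String).toList = "wiki".toList ++ '/' :: ("maps".toList ++ ['/']) from by decide]
      exact hFw _ _
    have h4 : PySem.Chars.startswith n "wiki/outputs/".toList = false := by
      rw [show ("wiki/outputs/" : String).toList = "wiki".toList ++ '/' :: ("outputs".toList ++ ['/']) from by decide]
      exact hFw _ _
    have h5 : PySem.Chars.startswith n "wiki/concepts/".toList = false := by
      rw [show ("wiki/concepts/" : String).toList = "wiki".toList ++ '/' :: ("concepts".toList ++ ['/']) from by decide]
      exact hFw _ _
    have h6 : PySem.Chars.startswith n "wiki/entities/".toList = false := by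
      rw [show ("wiki/entities/" : String).toList = "wiki".toList ++ '/' :: ("entities".toList ++ ['/']) from by decide]
      exact hFw _ _
    have h7 : PySem.Chars.startswith n "wiki/questions/".toList = false := by
      rw [show ("wiki/questions/" : String).toList = "wiki".toList ++ '/' :: ("questions".toList ++ ['/']) from by decide]
      exact hFw _ _
    have h8 : PySem.Chars.startswith n "wiki/dashboards/".toList = false := by
      rw [show ("wiki/dashboards/" : String).toList = "wiki".toList ++ '/' :: ("dashboards".toList ++ ['/']) from by decide]
      exact hFw _ _
    have h9 : PySem.Chars.startswith n "pages/".toList = false := by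
      rw [show ("pages/" : String).toList = "pages".toList ++ '/' :: ([] : List Char) from by decide]
      exact hFw _ _
    simp only [h1, h2, h3, h4, h5, h6, h7, h8, h9]
    simp
  · -- n = s ++ '/' :: t : at least two segments
    rcases hss' : ss with _ | ⟨s1, ss'⟩
    · rw [hss'] at hsegt; exact absurd hsegt (pvSegs_ne_nil t)
    subst hss'
    by_cases hp : s = "pages".toList
    · -- first segment "pages": A hits the "pages/" prefix
      subst hp
      have hFw : ∀ (b : List Char), PySem.Chars.startswith n ("wiki".toList ++ '/' :: b) = false :=
        fun b => pvSW_false_of_seg n _ b _ _ (by decide) hsegs (by decide)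
      have h1 : PySem.Chars.startswith n "wiki/articles/".toList = false := by
        rw [show ("wiki/articles/" : String).toList = "wiki".toList ++ '/' :: ("articles".toList ++ ['/']) from by decide]
        exact hFw _
      have h2 : PySem.Chars.startswith n "wiki/sources/".toList = false := by
        rw [show ("wiki/sources/" : String).toList = "wiki".toList ++ '/' :: ("sources".toList ++ ['/']) from by decide]
        exact hFw _
      have h3 : PySem.Chars.startswith n "wiki/maps/".toList = false := by
        rw [show ("wiki/maps/" : String).toList = "wiki".toList ++ '/' :: ("maps".toList ++ ['/']) from by decide]
        exact hFw _
      have h4 : PySem.Chars.startswith n "wiki/outputs/".toList = false := by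
        rw [show ("wiki/outputs/" : String).toList = "wiki".toList ++ '/' :: ("outputs".toList ++ ['/']) from by decide]
        exact hFw _
      have h5 : PySem.Chars.startswith n "wiki/concepts/".toList = false := by
        rw [show ("wiki/concepts/" : String).toList = "wiki".toList ++ '/' :: ("concepts".toList ++ ['/']) from by decide]
        exact hFw _
      have h6 : PySem.Chars.startswith n "wiki/entities/".toList = false := by
        rw [show ("wiki/entities/" : String).toList = "wiki".toList ++ '/' :: ("entities".toList ++ ['/']) from by decide]
        exact hFw _
      have h7 : PySem.Chars.startswith n "wiki/questions/".toList = false := by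
        rw [show ("wiki/questions/" : String).toList = "wiki".toList ++ '/' :: ("questions".toList ++ ['/']) from by decide]
        exact hFw _
      have h8 : PySem.Chars.startswith n "wiki/dashboards/".toList = false := by
        rw [show ("wiki/dashboards/" : String).toList = "wiki".toList ++ '/' :: ("dashboards".toList ++ ['/']) from by decide]
        exact hFw _
      have h9 : PySem.Chars.startswith n "pages/".toList = true := by
        rw [show ("pages/" : String).toList = "pages".toList ++ ['/'] from by decide, hnt,
          show ("pages".toList : List Char) ++ '/' :: t = ("pages".toList ++ ['/']) ++ t from by simp]
        exact pvSW_true_append _ _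
      simp only [h1, h2, h3, h4, h5, h6, h7, h8, h9]
      simp
    · by_cases hw : s = "wiki".toList
      · -- first segment "wiki"
        subst hw
        have h9 : PySem.Chars.startswith n "pages/".toList = false := by
          rw [show ("pages/" : String).toList = "pages".toList ++ '/' :: ([] : List Char) from by decide]
          exact pvSW_false_of_seg n _ _ _ _ (by decide) hsegs (by decide)
        rcases ss' with _ | ⟨s2, ss2⟩
        · -- exactly two segments: no wiki key can match
          have hkF : ∀ k : List Char, '/' ∉ k →
              PySem.Chars.startswith n ("wiki".toList ++ '/' :: (k ++ ['/'])) = false := by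
            intro k hk
            rw [hnt, Bool.eq_false_iff]
            intro htrue
            obtain ⟨u, hu⟩ := (pvWikiKey k t).mp htrue
            rw [hu, pvSegs_append _ _ hk] at hsegt
            exact pvSegs_ne_nil u (List.cons.inj hsegt).2
          have h1 : PySem.Chars.startswith n "wiki/articles/".toList = false := by
            rw [show ("wiki/articles/" : String).toList = "wiki".toList ++ '/' :: ("articles".toList ++ ['/']) from by decide]
            exact hkF _ (by decide)
          have h2 : PySem.Chars.startswith n "wiki/sources/".toList = false := by
            rw [show ("wiki/sources/" : String).toList = "wiki".toList ++ '/' :: ("sources".toList ++ ['/']) from by decide]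
            exact hkF _ (by decide)
          have h3 : PySem.Chars.startswith n "wiki/maps/".toList = false := by
            rw [show ("wiki/maps/" : String).toList = "wiki".toList ++ '/' :: ("maps".toList ++ ['/']) from by decide]
            exact hkF _ (by decide)
          have h4 : PySem.Chars.startswith n "wiki/outputs/".toList = false := by
            rw [show ("wiki/outputs/" : String).toList = "wiki".toList ++ '/' :: ("outputs".toList ++ ['/']) from by decide]
            exact hkF _ (by decide)
          have h5 : PySem.Chars.startswith n "wiki/concepts/".toList = false := by
            rw [show ("wiki/concepts/" : String).toList = "wiki".toList ++ '/' :: ("concepts".toList ++ ['/']) from by decide]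
            exact hkF _ (by decide)
          have h6 : PySem.Chars.startswith n "wiki/entities/".toList = false := by
            rw [show ("wiki/entities/" : String).toList = "wiki".toList ++ '/' :: ("entities".toList ++ ['/']) from by decide]
            exact hkF _ (by decide)
          have h7 : PySem.Chars.startswith n "wiki/questions/".toList = false := by
            rw [show ("wiki/questions/" : String).toList = "wiki".toList ++ '/' :: ("questions".toList ++ ['/']) from by decide]
            exact hkF _ (by decide)
          have h8 : PySem.Chars.startswith n "wiki/dashboards/".toList = false := by
            rw [show ("wiki/dashboards/" : String).toList = "wiki".toList ++ '/' :: ("dashboards".toList ++ ['/']) from by decide]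
            exact hkF _ (by decide)
          simp only [h1, h2, h3, h4, h5, h6, h7, h8, h9]
          simp
        · -- three or more segments: a wiki key matches exactly when it equals the second segment
          have hkey : ∀ k : List Char, '/' ∉ k →
              PySem.Chars.startswith n ("wiki".toList ++ '/' :: (k ++ ['/'])) = decide (s1 = k) := by
            intro k hk
            rw [hnt]
            rcases eq_or_ne s1 k with he | he
            · subst he
              have hex : ∃ u, t = s1 ++ '/' :: u := by
                obtain ⟨-, hcase2⟩ := pvSegs_spec t s1 (s2 :: ss2) hsegt
                rcases hcase2 with ⟨hcon, -⟩ | ⟨u, hu, -⟩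
                · exact absurd hcon (by simp)
                · exact ⟨u, hu⟩
              rw [decide_eq_true (rfl : s1 = s1)]
              exact (pvWikiKey s1 t).mpr hex
            · rw [decide_eq_false he, Bool.eq_false_iff]
              intro htrue
              obtain ⟨u, hu⟩ := (pvWikiKey k t).mp htrue
              rw [hu, pvSegs_append _ _ hk] at hsegt
              exact he (List.cons.inj hsegt).1.symm
          have h1 : PySem.Chars.startswith n "wiki/articles/".toList = decide (s1 = "articles".toList) := by
            rw [show ("wiki/articles/" : String).toList = "wiki".toList ++ '/' :: ("articles".toList ++ ['/']) from by decide]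
            exact hkey _ (by decide)
          have h2 : PySem.Chars.startswith n "wiki/sources/".toList = decide (s1 = "sources".toList) := by
            rw [show ("wiki/sources/" : String).toList = "wiki".toList ++ '/' :: ("sources".toList ++ ['/']) from by decide]
            exact hkey _ (by decide)
          have h3 : PySem.Chars.startswith n "wiki/maps/".toList = decide (s1 = "maps".toList) := by
            rw [show ("wiki/maps/" : String).toList = "wiki".toList ++ '/' :: ("maps".toList ++ ['/']) from by decide]
            exact hkey _ (by decide)
          have h4 : PySem.Chars.startswith n "wiki/outputs/".toList = decide (s1 = "outputs".toList) := by
            rw [show ("wiki/outputs/" : String).toList = "wiki".toList ++ '/' :: ("outputs".toList ++ ['/']) from by decide]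
            exact hkey _ (by decide)
          have h5 : PySem.Chars.startswith n "wiki/concepts/".toList = decide (s1 = "concepts".toList) := by
            rw [show ("wiki/concepts/" : String).toList = "wiki".toList ++ '/' :: ("concepts".toList ++ ['/']) from by decide]
            exact hkey _ (by decide)
          have h6 : PySem.Chars.startswith n "wiki/entities/".toList = decide (s1 = "entities".toList) := by
            rw [show ("wiki/entities/" : String).toList = "wiki".toList ++ '/' :: ("entities".toList ++ ['/']) from by decide]
            exact hkey _ (by decide)
          have h7 : PySem.Chars.startswith n "wiki/questions/".toList = decide (s1 = "questions".toList) := by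
            rw [show ("wiki/questions/" : String).toList = "wiki".toList ++ '/' :: ("questions".toList ++ ['/']) from by decide]
            exact hkey _ (by decide)
          have h8 : PySem.Chars.startswith n "wiki/dashboards/".toList = decide (s1 = "dashboards".toList) := by
            rw [show ("wiki/dashboards/" : String).toList = "wiki".toList ++ '/' :: ("dashboards".toList ++ ['/']) from by decide]
            exact hkey _ (by decide)
          have hB : (match ("wiki".toList :: s1 :: s2 :: ss2 : List (List Char)) with
              | [] => "unknown"
              | p0 :: rest =>
                if p0 = "pages".toList ∧ 1 ≤ rest.length then "article"
                else if p0 = "wiki".toList ∧ 2 ≤ rest.length then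
                  match rest with
                  | p1 :: _ => pvTypeMap.getD (String.ofList p1) "unknown"
                  | [] => "unknown"
                else "unknown") = pvTypeMap.getD (String.ofList s1) "unknown" := by
            show (if ("wiki".toList = "pages".toList ∧ 1 ≤ (s1 :: s2 :: ss2 : List (List Char)).length : Prop) then "article"
              else if ("wiki".toList = "wiki".toList ∧ 2 ≤ (s1 :: s2 :: ss2 : List (List Char)).length : Prop) then
                pvTypeMap.getD (String.ofList s1) "unknown"
              else "unknown") = pvTypeMap.getD (String.ofList s1) "unknown"
            rw [if_neg (by simp), if_pos (by simp)]
          rw [hB]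
          simp only [h1, h2, h3, h4, h5, h6, h7, h8, h9, decide_eq_true_eq]
          by_cases e1 : s1 = "articles".toList
          · rw [if_pos e1, e1,
              show String.ofList "articles".toList = "articles" from by decide]
            decide
          by_cases e2 : s1 = "sources".toList
          · rw [if_neg e1, if_pos e2, e2,
              show String.ofList "sources".toList = "sources" from by decide]
            decide
          by_cases e3 : s1 = "maps".toList
          · rw [if_neg e1, if_neg e2, if_pos e3, e3,
              show String.ofList "maps".toList = "maps" from by decide]
            decide
          by_cases e4 : s1 = "outputs".toList
          · rw [if_neg e1, if_neg e2, if_neg e3, if_pos e4, e4,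
              show String.ofList "outputs".toList = "outputs" from by decide]
            decide
          by_cases e5 : s1 = "concepts".toList
          · rw [if_neg e1, if_neg e2, if_neg e3, if_neg e4, if_pos e5, e5,
              show String.ofList "concepts".toList = "concepts" from by decide]
            decide
          by_cases e6 : s1 = "entities".toList
          · rw [if_neg e1, if_neg e2, if_neg e3, if_neg e4, if_neg e5, if_pos e6, e6,
              show String.ofList "entities".toList = "entities" from by decide]
            decide
          by_cases e7 : s1 = "questions".toList
          · rw [if_neg e1, if_neg e2, if_neg e3, if_neg e4, if_neg e5, if_neg e6, if_pos e7, e7,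
              show String.ofList "questions".toList = "questions" from by decide]
            decide
          by_cases e8 : s1 = "dashboards".toList
          · rw [if_neg e1, if_neg e2, if_neg e3, if_neg e4, if_neg e5, if_neg e6, if_neg e7, if_pos e8, e8,
              show String.ofList "dashboards".toList = "dashboards" from by decide]
            decide
          -- no key matches: "unknown" on both sides
          rw [if_neg e1, if_neg e2, if_neg e3, if_neg e4, if_neg e5, if_neg e6, if_neg e7, if_neg e8]
          rw [pvLookup_unknown (String.ofList s1)
            (by rw [Ne, pvOfList_eq_iff]; exact e1) (by rw [Ne, pvOfList_eq_iff]; exact e2)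
            (by rw [Ne, pvOfList_eq_iff]; exact e3) (by rw [Ne, pvOfList_eq_iff]; exact e4)
            (by rw [Ne, pvOfList_eq_iff]; exact e5) (by rw [Ne, pvOfList_eq_iff]; exact e6)
            (by rw [Ne, pvOfList_eq_iff]; exact e7) (by rw [Ne, pvOfList_eq_iff]; exact e8)]
          decide
      · -- first segment neither "pages" nor "wiki": nothing matches
        have hFw : ∀ (b : List Char), PySem.Chars.startswith n ("wiki".toList ++ '/' :: b) = false :=
          fun b => pvSW_false_of_seg n _ b _ _ (by decide) hsegs hw
        have h1 : PySem.Chars.startswith n "wiki/articles/".toList = false := by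
          rw [show ("wiki/articles/" : String).toList = "wiki".toList ++ '/' :: ("articles".toList ++ ['/']) from by decide]
          exact hFw _
        have h2 : PySem.Chars.startswith n "wiki/sources/".toList = false := by
          rw [show ("wiki/sources/" : String).toList = "wiki".toList ++ '/' :: ("sources".toList ++ ['/']) from by decide]
          exact hFw _
        have h3 : PySem.Chars.startswith n "wiki/maps/".toList = false := by
          rw [show ("wiki/maps/" : String).toList = "wiki".toList ++ '/' :: ("maps".toList ++ ['/']) from by decide]
          exact hFw _
        have h4 : PySem.Chars.startswith n "wiki/outputs/".toList = false := by
          rw [show ("wiki/outputs/" : String).toList = "wiki".toList ++ '/' :: ("outputs".toList ++ ['/']) from by decide]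
          exact hFw _
        have h5 : PySem.Chars.startswith n "wiki/concepts/".toList = false := by
          rw [show ("wiki/concepts/" : String).toList = "wiki".toList ++ '/' :: ("concepts".toList ++ ['/']) from by decide]
          exact hFw _
        have h6 : PySem.Chars.startswith n "wiki/entities/".toList = false := by
          rw [show ("wiki/entities/" : String).toList = "wiki".toList ++ '/' :: ("entities".toList ++ ['/']) from by decide]
          exact hFw _
        have h7 : PySem.Chars.startswith n "wiki/questions/".toList = false := by
          rw [show ("wiki/questions/" : String).toList = "wiki".toList ++ '/' :: ("questions".toList ++ ['/']) from by decide]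
          exact hFw _
        have h8 : PySem.Chars.startswith n "wiki/dashboards/".toList = false := by
          rw [show ("wiki/dashboards/" : String).toList = "wiki".toList ++ '/' :: ("dashboards".toList ++ ['/']) from by decide]
          exact hFw _
        have h9 : PySem.Chars.startswith n "pages/".toList = false := by
          rw [show ("pages/" : String).toList = "pages".toList ++ '/' :: ([] : List Char) from by decide]
          exact pvSW_false_of_seg n _ _ _ _ (by decide) hsegs hp
        simp only [h1, h2, h3, h4, h5, h6, h7, h8, h9]
        have hp' : s ≠ ['p', 'a', 'g', 'e', 's'] := by simpa using hp
        have hw' : s ≠ ['w', 'i', 'k', 'i'] := by simpa using hw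
        simp [hp', hw']

-- ===== VERDICT (by name: the statement is the Claim_ definition above) =====
theorem inferred_page_type_py_spec : Claim_equal_inferred_page_type_py := by
  intro rp _
  exact pvMain (PySem.Str.replace rp "\\" "/")
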